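-- pv_equiv track=rewrite | github.com/zhudotexe/SkyRL | skyrl/train/trainer.py | compute_prompt_mini_batch_boundaries
-- ===== SOURCE A (Python) =====
-- from typing import Any, Dict, List, Optional, Tuple, Union
--
-- def compute_prompt_mini_batch_boundaries(
--     prompt_end_indices: List[int],
--     mini_batch_size_in_prompts: int,
-- ) -> List[Tuple[int, int]]:
--     """Compute mini-batch boundaries from pre-computed prompt end-indices.
--
--     Each mini-batch spans exactly ``mini_batch_size_in_prompts`` prompts
--     (the last mini-batch may be smaller if the total prompt count is not
--     divisible).
--
--     Returns:
--         List of ``(start, end)`` index pairs suitable for slicing a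
--         TrainingInputBatch.
--     """
--     num_prompts = len(prompt_end_indices)
--     boundaries: List[Tuple[int, int]] = []
--     start_seq = 0
--     for i in range(0, num_prompts, mini_batch_size_in_prompts):
--         end_prompt_idx = min(i + mini_batch_size_in_prompts, num_prompts) - 1
--         end_seq = prompt_end_indices[end_prompt_idx]
--         boundaries.append((start_seq, end_seq))
--         start_seq = end_seq
--     return boundaries
-- ===== SOURCE B (Python) =====
-- def compute_prompt_mini_batch_boundaries(
--     prompt_end_indices,
--     mini_batch_size_in_prompts,
-- ):
--     mb = mini_batch_size_in_prompts
--     if mb <= 0: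
--         return []
--     # ends of all FULL mini-batches, grabbed in one extended slice with stride mb
--     ends = prompt_end_indices[mb - 1 :: mb]
--     # a ragged final mini-batch ends at the last prompt
--     if len(prompt_end_indices) % mb:
--         ends.append(prompt_end_indices[-1])
--     # each boundary pair is (previous end or 0, end)
--     return list(zip([0] + ends, ends))
-- ===== Notes on version B (the rewrite author's own statement) =====
-- stated objective: idiomatic
-- what changed: Replaces the index-strided loop with running start_seq accumulator by a loop-free formulation: one extended slice prompt_end_indices[mb-1::mb] collects all full-batch ends, one conditional append handles the ragged tail, and zip pairs consecutive endpoints.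
import Mathlib
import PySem

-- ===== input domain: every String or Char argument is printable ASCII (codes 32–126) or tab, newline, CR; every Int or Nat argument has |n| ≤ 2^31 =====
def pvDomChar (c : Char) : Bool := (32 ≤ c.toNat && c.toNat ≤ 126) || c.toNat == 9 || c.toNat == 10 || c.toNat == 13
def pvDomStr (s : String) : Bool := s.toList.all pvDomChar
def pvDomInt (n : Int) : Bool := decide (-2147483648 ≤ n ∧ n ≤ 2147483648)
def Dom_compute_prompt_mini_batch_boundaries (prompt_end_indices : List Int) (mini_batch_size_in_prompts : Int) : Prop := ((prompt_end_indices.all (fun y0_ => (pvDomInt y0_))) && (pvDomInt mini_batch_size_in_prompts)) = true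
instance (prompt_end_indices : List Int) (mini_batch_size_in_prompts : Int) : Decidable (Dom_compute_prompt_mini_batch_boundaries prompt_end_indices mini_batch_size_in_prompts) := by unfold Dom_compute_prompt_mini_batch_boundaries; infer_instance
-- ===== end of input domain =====

-- B is loop-free: one extended slice pei[mb-1::mb] collects all full-batch ends, a conditional
-- append handles the ragged tail, and zip pairs consecutive endpoints (objective: idiomatic).

-- ===== PORT A =====
def compute_prompt_mini_batch_boundaries (prompt_end_indices : List Int) (mini_batch_size_in_prompts : Int) : List (Int × Int) :=
  let num_prompts : Int := prompt_end_indices.length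
  let st := (PySem.List.pyRange 0 num_prompts mini_batch_size_in_prompts).foldl
    (fun (st : List (Int × Int) × Int) i =>
      let end_prompt_idx := min (i + mini_batch_size_in_prompts) num_prompts - 1
      -- the index is always in range when the loop body runs, so pyGetD is exact here
      let end_seq := PySem.List.pyGetD prompt_end_indices end_prompt_idx 0
      (st.1 ++ [(st.2, end_seq)], end_seq))
    ([], 0)
  st.1

-- ===== PORT B =====
def compute_prompt_mini_batch_boundaries_alt (prompt_end_indices : List Int) (mini_batch_size_in_prompts : Int) : List (Int × Int) :=
  let mb := mini_batch_size_in_prompts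
  if mb ≤ 0 then []
  else
    -- pei[mb-1::mb]; slice? is some here since the step mb is nonzero
    let ends0 := (PySem.List.slice? prompt_end_indices (some (mb - 1)) none mb).getD []
    -- pei[-1] is in range here since len % mb ≠ 0 forces the list nonempty, so pyGetD is exact
    let ends := if PySem.Int.mod (prompt_end_indices.length : Int) mb ≠ 0
                then ends0 ++ [PySem.List.pyGetD prompt_end_indices (-1) 0]
                else ends0
    ((0 : Int) :: ends).zip ends

-- ===== PRECONDITION & SPEC =====
-- Pre_ excludes mini_batch_size_in_prompts = 0, on which Python's range(0, n, 0) raises ValueError.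
def Pre_compute_prompt_mini_batch_boundaries (prompt_end_indices : List Int) (mini_batch_size_in_prompts : Int) : Prop := mini_batch_size_in_prompts ≠ 0
instance (prompt_end_indices : List Int) (mini_batch_size_in_prompts : Int) : Decidable (Pre_compute_prompt_mini_batch_boundaries prompt_end_indices mini_batch_size_in_prompts) := by unfold Pre_compute_prompt_mini_batch_boundaries; infer_instance
def pvWitness_compute_prompt_mini_batch_boundaries : List Int × Int := ([3, 5, 9, 12, 17], 2)
def Spec_compute_prompt_mini_batch_boundaries (prompt_end_indices : List Int) (mini_batch_size_in_prompts : Int) (out : List (Int × Int)) : Prop := out = compute_prompt_mini_batch_boundaries_alt prompt_end_indices mini_batch_size_in_prompts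
instance (prompt_end_indices : List Int) (mini_batch_size_in_prompts : Int) (out : List (Int × Int)) : Decidable (Spec_compute_prompt_mini_batch_boundaries prompt_end_indices mini_batch_size_in_prompts out) := by unfold Spec_compute_prompt_mini_batch_boundaries; infer_instance

-- ===== CLAIM =====
def Claim_equal_compute_prompt_mini_batch_boundaries : Prop := ∀ (prompt_end_indices : List Int) (mini_batch_size_in_prompts : Int), Dom_compute_prompt_mini_batch_boundaries prompt_end_indices mini_batch_size_in_prompts → Pre_compute_prompt_mini_batch_boundaries prompt_end_indices mini_batch_size_in_prompts → Spec_compute_prompt_mini_batch_boundaries prompt_end_indices mini_batch_size_in_prompts (compute_prompt_mini_batch_boundaries prompt_end_indices mini_batch_size_in_prompts)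

-- ===== LEMMAS AND PROOFS =====

-- A's fold produces consecutive pairs of the ends list.
theorem foldl_pairs_eq_zip (f : Int → Int) :
    ∀ (r : List Int) (acc : List (Int × Int)) (s : Int),
      (r.foldl (fun (st : List (Int × Int) × Int) i => (st.1 ++ [(st.2, f i)], f i)) (acc, s)).1
        = acc ++ (s :: r.map f).zip (r.map f) := by
  intro r
  induction r with
  | nil => intro acc s; simp
  | cons i rest ih =>
    intro acc s
    simp only [List.foldl_cons, List.map_cons, List.zip_cons_cons]
    rw [ih]
    cases h : rest.map f with
    | nil => simp
    | cons e es => simp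

theorem filterMap_some_eq_map {α β : Type} (g : α → Option β) (h : α → β) :
    ∀ (l : List α), (∀ a ∈ l, g a = some (h a)) → l.filterMap g = l.map h := by
  intro l
  induction l with
  | nil => intro _; rfl
  | cons x xs ih =>
    intro H
    simp only [List.filterMap_cons, H x (List.mem_cons_self), List.map_cons]
    rw [ih (fun a ha => H a (List.mem_cons_of_mem _ ha))]

-- negative step, nonnegative stop, start 0: empty range
theorem pyRange_zero_neg_nil (n mb : Int) (hn : 0 ≤ n) (hmb : mb < 0) :
    PySem.List.pyRange 0 n mb = [] := by
  have h0 : ¬ mb = 0 := by omega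
  have h1 : ¬ (0:Int) < mb := by omega
  have h2 : ¬ n < 0 := by omega
  simp [PySem.List.pyRange, h0, h1, h2]

-- B's slice pei[mb-1::mb] is the list of full-chunk last elements, indexed over range (n/mb)
theorem slice_step_ends (pei : List Int) (mb : Int) (hmb : 1 ≤ mb) :
    (PySem.List.slice? pei (some (mb - 1)) none mb).getD []
      = (List.range (((pei.length : Int)) / mb).toNat).map
          (fun (k : Nat) => PySem.List.pyGetD pei ((mb - 1) + mb * (k : Int)) 0) := by
  have hn : (0:Int) ≤ (pei.length : Int) := by positivity
  have h0 : ¬ mb = 0 := by omega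
  have h1 : ¬ mb < 0 := by omega
  have h2 : 0 < mb := by omega
  have h3 : ¬ mb - 1 < 0 := by omega
  simp only [PySem.List.slice?, PySem.List.sliceIndices, if_neg h0, if_neg h1, if_pos h2, if_neg h3]
  set n : Int := (pei.length : Int) with hndef
  have hdm := Int.ediv_add_emod n mb
  have hr0 : 0 ≤ n % mb := Int.emod_nonneg n h0
  by_cases hc : mb ≤ n
  · have hmin : min (mb - 1) n = mb - 1 := min_eq_left (by omega)
    rw [hmin, if_pos (by omega : mb - 1 < n)]
    have harith : n - (mb - 1) + mb - 1 = n := by ring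
    rw [harith, Option.getD_some]
    apply filterMap_some_eq_map
    intro a ha
    have ha' : (a : Int) < n / mb := by
      have := List.mem_range.mp ha
      have hq0 : 0 ≤ n / mb := Int.ediv_nonneg hn (by omega)
      omega
    have hmul : mb * ((a : Int) + 1) ≤ mb * (n / mb) :=
      mul_le_mul_of_nonneg_left (by omega) (by omega)
    have hma : 0 ≤ mb * (a : Int) := mul_nonneg (by omega) (by positivity)
    have hi1 : 0 ≤ mb - 1 + mb * (a : Int) := by linarith
    have hi2 : mb - 1 + mb * (a : Int) < n := by nlinarith
    have hlt : (mb - 1 + mb * (a : Int)).toNat < pei.length := by omega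
    rw [PySem.List.pyGetD_eq_getElem pei 0 hi1 (by omega), List.getElem?_eq_getElem hlt]
  · have hmin : min (mb - 1) n = n := min_eq_right (by omega)
    rw [hmin, if_neg (by omega : ¬ n < n)]
    have hq : n / mb = 0 := Int.ediv_eq_zero_of_lt hn (by omega)
    rw [hq]
    simp

theorem ends_eq (pei : List Int) (mb : Int) (hmb : 1 ≤ mb) :
    (PySem.List.pyRange 0 (pei.length : Int) mb).map
        (fun i => PySem.List.pyGetD pei (min (i + mb) (pei.length : Int) - 1) 0)
      = (if PySem.Int.mod (pei.length : Int) mb ≠ 0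
         then (PySem.List.slice? pei (some (mb - 1)) none mb).getD []
                ++ [PySem.List.pyGetD pei (-1) 0]
         else (PySem.List.slice? pei (some (mb - 1)) none mb).getD []) := by
  have hn : (0:Int) ≤ (pei.length : Int) := by positivity
  have h0 : ¬ mb = 0 := by omega
  have h2 : 0 < mb := by omega
  set n : Int := (pei.length : Int) with hndef
  have hdm : mb * (n / mb) + n % mb = n := Int.ediv_add_emod n mb
  have hr0 : 0 ≤ n % mb := Int.emod_nonneg n h0
  have hrlt : n % mb < mb := Int.emod_lt_of_pos n h2
  have hq0 : 0 ≤ n / mb := Int.ediv_nonneg hn (by omega)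
  have hmulqn : mb * (n / mb) ≤ n := by linarith
  rw [PySem.List.pyRange_of_pos 0 n h2, List.map_map, slice_step_ends pei mb hmb,
      PySem.Int.mod_eq_emod_of_pos h2]
  rw [← hndef]
  by_cases hr : n % mb = 0
  · have hcA : (if 0 < n then ((n - 0 + mb - 1) / mb).toNat else 0) = (n / mb).toNat := by
      by_cases hn0 : 0 < n
      · rw [if_pos hn0]
        have he : n - 0 + mb - 1 = (mb - 1) + mb * (n / mb) := by linarith
        rw [he, Int.add_mul_ediv_left _ _ h0, Int.ediv_eq_zero_of_lt (by omega) (by omega), zero_add]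
      · rw [if_neg hn0]
        have : n = 0 := by omega
        simp [this]
    rw [hcA, if_neg (by simpa using hr)]
    apply List.map_congr_left
    intro k hk
    have hklt : (k : Int) < n / mb := by
      have := List.mem_range.mp hk
      omega
    have hmul : mb * ((k : Int) + 1) ≤ mb * (n / mb) :=
      mul_le_mul_of_nonneg_left (by omega) (by omega)
    have hmin : min (0 + mb * (k : Int) + mb) n = 0 + mb * (k : Int) + mb := by
      apply min_eq_left; nlinarith
    simp only [Function.comp_apply]
    rw [hmin]
    congr 1
    ring
  · have hn0 : 0 < n := by
      by_contra hcon
      apply hr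
      have hz : n = 0 := by omega
      rw [hz]
      simp
    have hcA : (if 0 < n then ((n - 0 + mb - 1) / mb).toNat else 0) = (n / mb).toNat + 1 := by
      rw [if_pos hn0]
      have he : n - 0 + mb - 1 = (n % mb - 1) + mb * (n / mb + 1) := by linarith
      rw [he, Int.add_mul_ediv_left _ _ h0, Int.ediv_eq_zero_of_lt (by omega) (by omega), zero_add]
      omega
    rw [hcA, if_pos (by simpa using hr), List.range_succ, List.map_append]
    congr 1
    · apply List.map_congr_left
      intro k hk
      have hklt : (k : Int) < n / mb := by
        have := List.mem_range.mp hk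
        omega
      have hmul : mb * ((k : Int) + 1) ≤ mb * (n / mb) :=
        mul_le_mul_of_nonneg_left (by omega) (by omega)
      have hmin : min (0 + mb * (k : Int) + mb) n = 0 + mb * (k : Int) + mb := by
        apply min_eq_left; nlinarith
      simp only [Function.comp_apply]
      rw [hmin]
      congr 1
      ring
    · simp only [List.map_cons, List.map_nil, Function.comp_apply]
      have hcast : ((n / mb).toNat : Int) = n / mb := Int.toNat_of_nonneg hq0
      have hmin : min (0 + mb * ((n / mb).toNat : Int) + mb) n = n := by
        rw [hcast]; apply min_eq_right; linarith
      rw [hmin]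
      have hne : pei ≠ [] := by
        intro h; rw [h] at hndef; simp at hndef; omega
      rw [PySem.List.pyGetD_neg_one pei 0 hne,
          PySem.List.pyGetD_eq_getElem pei 0 (by omega) (by omega),
          List.getLast_eq_getElem]
      simp only [show (n - 1).toNat = pei.length - 1 from by omega]

-- ===== VERDICT =====
theorem compute_prompt_mini_batch_boundaries_spec : Claim_equal_compute_prompt_mini_batch_boundaries := by
  intro pei mb _ hpre
  unfold Spec_compute_prompt_mini_batch_boundaries
  unfold Pre_compute_prompt_mini_batch_boundaries at hpre
  unfold compute_prompt_mini_batch_boundaries compute_prompt_mini_batch_boundaries_alt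
  by_cases hmb : mb ≤ 0
  · have hneg : mb < 0 := by omega
    simp only [hmb, if_true]
    rw [pyRange_zero_neg_nil _ mb (by positivity) hneg]
    rfl
  · simp only [hmb, if_false]
    rw [foldl_pairs_eq_zip (fun i => PySem.List.pyGetD pei (min (i + mb) (pei.length : Int) - 1) 0)]
    rw [ends_eq pei mb (by omega)]
    simp
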